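-- pv_equiv track=rewrite | github.com/MaksDrap/tests-for-checking-the-randomness-of-sequences-of-bits | Project.py | max_length_test
-- ===== SOURCE A (Python) =====
-- def max_length_test(sequence):
--     max_ones_series = max_zeros_series = 0
--     ones_series = zeros_series = 0
--     prev_bit = None
--     for bit in sequence:
--         if bit == 1:
--             ones_series += 1
--             zeros_series = 0
--             max_ones_series = max(max_ones_series, ones_series)
--         else:
--             zeros_series += 1
--             ones_series = 0
--             max_zeros_series = max(max_zeros_series, zeros_series)
--         prev_bit = bit
--     if max_ones_series > 36 or max_zeros_series > 36:
--         return False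
--     return True
-- ===== SOURCE B (Python) =====
-- def max_length_test(sequence):
--     # Group-then-measure: split the (bit == 1) sequence into maximal runs
--     # of equal booleans, take the longest run length (0 for empty input).
--     bits = [bit == 1 for bit in sequence]
--     lens = []
--     i = 0
--     n = len(bits)
--     while i < n:
--         j = i
--         while j < n and bits[j] == bits[i]:
--             j += 1
--         lens.append(j - i)
--         i = j
--     return max(lens, default=0) <= 36
-- ===== Notes on version B (the rewrite author's own statement) =====
-- stated objective: alternative
-- what changed: B maps bits to booleans, splits the sequence into maximal runs of equal booleans and compares the longest run length against 36, replacing A's four running counters (separate ones/zeros series and maxima) updated per element.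
import Mathlib
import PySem

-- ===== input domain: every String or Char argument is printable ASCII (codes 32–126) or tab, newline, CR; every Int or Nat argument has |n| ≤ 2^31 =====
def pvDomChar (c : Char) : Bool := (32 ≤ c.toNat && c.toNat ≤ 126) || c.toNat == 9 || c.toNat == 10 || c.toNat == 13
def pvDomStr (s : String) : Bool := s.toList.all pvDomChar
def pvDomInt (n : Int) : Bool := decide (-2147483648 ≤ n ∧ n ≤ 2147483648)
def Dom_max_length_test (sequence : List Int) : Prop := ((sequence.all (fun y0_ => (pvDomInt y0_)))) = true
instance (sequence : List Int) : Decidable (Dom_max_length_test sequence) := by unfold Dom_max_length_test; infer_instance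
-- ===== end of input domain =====

-- B replaces A's per-element run counters by a group-then-measure pass (maximal runs of
-- equal (bit == 1) booleans, longest run ≤ 36); same cost, alternative decomposition.

-- ===== PORT A =====
-- state = (max_ones_series, max_zeros_series, ones_series, zeros_series, prev_bit)
def stepA (st : Int × Int × Int × Int × Option Int) (bit : Int) :
    Int × Int × Int × Int × Option Int :=
  match st with
  | (mo, mz, o, z, _) =>
    if bit == 1 then (max mo (o + 1), mz, o + 1, 0, some bit)
    else (mo, max mz (z + 1), 0, z + 1, some bit)

def max_length_test (sequence : List Int) : Bool :=
  let s := sequence.foldl stepA (0, 0, 0, 0, none)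
  if s.1 > 36 ∨ s.2.1 > 36 then false else true

-- ===== PORT B =====
-- lengths of the maximal runs of equal booleans (the inner `while j < n and
-- bits[j] == bits[i]` scan of Source B is the takeWhile; advancing i to j is the dropWhile)
def runLens : List Bool → List Int
  | [] => []
  | b :: l =>
    ((1 : Int) + (l.takeWhile (fun x => x == b)).length) ::
      runLens (l.dropWhile (fun x => x == b))
termination_by l => l.length
decreasing_by
  exact Nat.lt_succ_of_le (List.length_dropWhile_le _ _)

def max_length_test_alt (sequence : List Int) : Bool :=
  let bits := sequence.map (fun bit => bit == 1)
  let longest := (runLens bits).foldl max 0   -- max(lens, default=0)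
  decide (longest ≤ 36)

-- ===== PRECONDITION & SPEC =====
def Spec_max_length_test (sequence : List Int) (out : Bool) : Prop := out = max_length_test_alt sequence
instance (sequence : List Int) (out : Bool) : Decidable (Spec_max_length_test sequence out) := by unfold Spec_max_length_test; infer_instance

-- ===== CLAIM (what is proved, stated in full; the proofs are below) =====
def Claim_equal_max_length_test : Prop := ∀ (sequence : List Int), Dom_max_length_test sequence → Spec_max_length_test sequence (max_length_test sequence)

-- ===== LEMMAS AND PROOFS =====

@[simp] theorem runLens_nil : runLens [] = [] := by rw [runLens]
@[simp] theorem runLens_cons (b : Bool) (l : List Bool) : runLens (b :: l) =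
    ((1 : Int) + (l.takeWhile (fun x => x == b)).length) ::
      runLens (l.dropWhile (fun x => x == b)) := by rw [runLens]

-- maximal run length of the boolean list, with carried-in current run lengths o (trues) / z (falses)
def auxB : Int → Int → List Bool → Int
  | _, _, [] => 0
  | o, _, true :: l => max (o + 1) (auxB (o + 1) 0 l)
  | _, z, false :: l => max (z + 1) (auxB 0 (z + 1) l)

theorem foldl_max_shift (xs : List Int) (a b : Int) :
    xs.foldl max (max a b) = max a (xs.foldl max b) := by
  induction xs generalizing b with
  | nil => simp
  | cons x xs ih =>
    simp only [List.foldl_cons]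
    rw [max_assoc, ih]

theorem foldl_max_cons (x : Int) (xs : List Int) :
    (x :: xs).foldl max 0 = max x (xs.foldl max 0) := by
  simp only [List.foldl_cons]
  rw [max_comm 0 x, foldl_max_shift]

theorem foldl_max_nonneg (xs : List Int) : 0 ≤ xs.foldl max 0 := by
  have h := foldl_max_shift xs 0 0
  simp only [max_self] at h
  omega

theorem lemma1 (seq : List Int) :
    ∀ (mo mz o z : Int) (p : Option Int), 0 ≤ mo → 0 ≤ mz →
      max (seq.foldl stepA (mo, mz, o, z, p)).1 (seq.foldl stepA (mo, mz, o, z, p)).2.1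
        = max (max mo mz) (auxB o z (seq.map (fun bit => bit == 1))) := by
  induction seq with
  | nil => intro mo mz o z p hmo hmz; simp [auxB]; omega
  | cons bit tl ih =>
    intro mo mz o z p hmo hmz
    by_cases hb : bit = 1
    · have h1 : (bit == (1 : Int)) = true := by simp [hb]
      simp only [List.foldl_cons, List.map_cons, h1, stepA, ite_true]
      rw [ih (max mo (o + 1)) mz (o + 1) 0 (some bit) (by omega) hmz]
      simp only [auxB]
      omega
    · have h1 : (bit == (1 : Int)) = false := by simp [hb]
      simp only [List.foldl_cons, List.map_cons, h1, stepA, Bool.false_eq_true, ite_false]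
      rw [ih mo (max mz (z + 1)) 0 (z + 1) (some bit) hmo (by omega)]
      simp only [auxB]
      omega

theorem lemma2 (bl : List Bool) :
    ∀ (o z : Int), 0 ≤ o → 0 ≤ z →
      auxB o z bl = match bl with
        | [] => (0 : Int)
        | b :: l => max ((if b then o else z) + (1 + ((l.takeWhile (fun x => x == b)).length : Int)))
            ((runLens (l.dropWhile (fun x => x == b))).foldl max 0) := by
  induction bl with
  | nil => intro o z _ _; simp [auxB]
  | cons b l ih =>
    intro o z ho hz
    cases b
    · -- first bit false
      simp only [auxB]
      cases l with
      | nil => simp [auxB]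
      | cons b' l' =>
        rw [ih 0 (z + 1) (by omega) (by omega)]
        have hnn := foldl_max_nonneg (runLens (List.dropWhile (fun x => x == true) l'))
        have hnn' := foldl_max_nonneg (runLens (List.dropWhile (fun x => x == false) l'))
        cases b' <;>
          simp only [List.takeWhile, List.dropWhile, runLens_cons, foldl_max_cons,
            Bool.true_beq, Bool.false_beq, Bool.not_true, Bool.not_false,
            List.length_cons, List.length_nil, Nat.cast_zero, add_zero] <;>
          push_cast <;> omega
    · -- first bit true
      simp only [auxB]
      cases l with
      | nil => simp [auxB]
      | cons b' l' =>
        rw [ih (o + 1) 0 (by omega) (by omega)]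
        have hnn := foldl_max_nonneg (runLens (List.dropWhile (fun x => x == true) l'))
        have hnn' := foldl_max_nonneg (runLens (List.dropWhile (fun x => x == false) l'))
        cases b' <;>
          simp only [List.takeWhile, List.dropWhile, runLens_cons, foldl_max_cons,
            Bool.true_beq, Bool.false_beq, Bool.not_true, Bool.not_false,
            List.length_cons, List.length_nil, Nat.cast_zero, add_zero] <;>
          push_cast <;> omega
theorem lemma2' (bl : List Bool) : auxB 0 0 bl = (runLens bl).foldl max 0 := by
  rw [lemma2 bl 0 0 le_rfl le_rfl]
  cases bl with
  | nil => simp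
  | cons b l =>
    rw [runLens_cons, foldl_max_cons]
    cases b <;> simp

-- ===== VERDICT (by name: the statement is the Claim_ definition above) =====
theorem max_length_test_spec : Claim_equal_max_length_test := by
  intro seq _
  unfold Spec_max_length_test max_length_test max_length_test_alt
  have h := lemma1 seq 0 0 0 0 none le_rfl le_rfl
  rw [lemma2'] at h
  simp only [max_self] at h
  have hnn := foldl_max_nonneg (runLens (seq.map (fun bit => bit == 1)))
  set s := seq.foldl stepA (0, 0, 0, 0, none) with hs
  by_cases hle : (runLens (seq.map (fun bit => bit == 1))).foldl max 0 ≤ 36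
  · rw [if_neg (by omega), decide_eq_true (by omega)]
  · rw [if_pos (by omega), decide_eq_false (by omega)]
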